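-- pv_equiv track=rewrite | github.com/voyageinai/chinese-chess | scripts/xiangqi_explicit_features.py | _connected_crossed
-- ===== SOURCE A (Python) =====
-- def _connected_crossed(pawns: list[tuple[int, int]]) -> int:
--     by_row: dict[int, list[int]] = {}
--     for row, col in pawns:
--         by_row.setdefault(row, []).append(col)
--
--     total = 0
--     for cols in by_row.values():
--         cols.sort()
--         for left, right in zip(cols, cols[1:]):
--             if right == left + 1:
--                 total += 1
--     return total
-- ===== SOURCE B (Python) =====
-- def _connected_crossed(pawns: list[tuple[int, int]]) -> int:
--     occupied = set(pawns)
--     return sum(1 for r, c in occupied if (r, c + 1) in occupied)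
-- ===== Notes on version B (the rewrite author's own statement) =====
-- stated objective: idiomatic
-- what changed: Replaces the row-grouping dict, per-row sort and adjacent-pair zip scan with a single set of positions probed for the right neighbour (r, c+1); duplicate positions collapse in the set exactly as A's sorted adjacency does.
import Mathlib
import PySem

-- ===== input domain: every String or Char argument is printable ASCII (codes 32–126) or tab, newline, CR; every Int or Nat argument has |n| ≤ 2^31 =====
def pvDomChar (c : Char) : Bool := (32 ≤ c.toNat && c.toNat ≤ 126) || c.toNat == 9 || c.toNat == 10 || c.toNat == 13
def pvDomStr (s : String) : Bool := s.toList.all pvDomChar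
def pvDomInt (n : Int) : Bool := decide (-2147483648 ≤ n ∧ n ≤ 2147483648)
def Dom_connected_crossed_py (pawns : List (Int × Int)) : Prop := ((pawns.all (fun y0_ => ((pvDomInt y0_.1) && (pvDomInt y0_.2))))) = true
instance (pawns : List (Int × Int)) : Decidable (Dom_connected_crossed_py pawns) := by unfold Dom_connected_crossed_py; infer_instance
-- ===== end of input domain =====

-- B replaces A's row-grouping dict, per-row sort and adjacent-pair zip scan by a single
-- set of positions probed for the right neighbour (r, c+1); same return value, idiomatic.


-- ===== PORT A =====
-- by_row.setdefault(row, []).append(col)  ==  by_row[row] = by_row.get(row, []) + [col]  ==  Dict.modify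
def connected_crossed_py (pawns : List (Int × Int)) : Int :=
  let by_row : PySem.Dict Int (List Int) :=
    pawns.foldl (fun d p => d.modify p.1 [] (fun cs => cs ++ [p.2])) PySem.Dict.empty
  (PySem.Dict.values by_row).foldl
    (fun total cols =>
      let sc := PySem.List.sorted cols (fun x => x) false
      (sc.zip (PySem.List.slice sc (some 1) none)).foldl
        (fun t lr => if lr.2 = lr.1 + 1 then t + 1 else t) total)
    0

-- ===== PORT B =====
def connected_crossed_py_alt (pawns : List (Int × Int)) : Int :=
  let occupied : PySem.Set (Int × Int) := PySem.Set.ofList pawns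
  occupied.foldl
    (fun t p => if PySem.Set.contains occupied (p.1, p.2 + 1) then t + 1 else t) 0

-- ===== PRECONDITION & SPEC =====
def Spec_connected_crossed_py (pawns : List (Int × Int)) (out : Int) : Prop := out = connected_crossed_py_alt pawns
instance (pawns : List (Int × Int)) (out : Int) : Decidable (Spec_connected_crossed_py pawns out) := by unfold Spec_connected_crossed_py; infer_instance

-- ===== CLAIM (what is proved, stated in full; the proofs are below) =====
def Claim_equal_connected_crossed_py : Prop := ∀ (pawns : List (Int × Int)), Dom_connected_crossed_py pawns → Spec_connected_crossed_py pawns (connected_crossed_py pawns)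

-- ===== LEMMAS AND PROOFS =====

-- cols of a given row, in pawn order (what A's grouping dict stores at key r)
def pvColsOf (pawns : List (Int × Int)) (r : Int) : List Int :=
  (pawns.filter (fun p => p.1 == r)).map (·.2)

-- the common abstract count for one row: distinct columns c present with c+1 also present
def pvRowCard (l : List Int) : ℕ :=
  (l.toFinset.filter (fun c => c + 1 ∈ l)).card

theorem pvRowCard_congr (l m : List Int) (h : ∀ x, x ∈ l ↔ x ∈ m) :
    pvRowCard l = pvRowCard m := by
  unfold pvRowCard
  have ht : l.toFinset = m.toFinset := by ext x; simp [List.mem_toFinset, h x]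
  rw [ht]
  congr 1
  apply Finset.filter_congr
  intro x _
  simpa using h (x + 1)

-- KEY LEMMA: on a ≤-sorted list, the adjacent-successor count is the distinct-c-with-c+1 count
theorem pv_adj_sorted : ∀ (s : List Int), s.Pairwise (· ≤ ·) →
    (s.zip s.tail).countP (fun lr => decide (lr.2 = lr.1 + 1)) = pvRowCard s
  | [], _ => by simp [pvRowCard]
  | [a], _ => by
    have hf : ({a} : Finset Int).filter (fun c => c + 1 = a) = ∅ := by
      ext c; simp; omega
    simp [pvRowCard, hf]
  | a :: b :: t, h => by
    have h1 := List.pairwise_cons.mp h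
    have hab : a ≤ b := h1.1 b (by simp)
    have hbt : (b :: t).Pairwise (· ≤ ·) := h1.2
    have hmin : ∀ x ∈ b :: t, b ≤ x := by
      intro x hx
      rcases List.mem_cons.mp hx with rfl | hx
      · exact le_refl x
      · exact (List.pairwise_cons.mp hbt).1 x hx
    have ih := pv_adj_sorted (b :: t) hbt
    have hz : ((a :: b :: t).zip (a :: b :: t).tail) = (a, b) :: ((b :: t).zip t) := rfl
    rw [hz, List.countP_cons]
    rcases lt_or_eq_of_le hab with hlt | rfl
    · -- a < b : a is a fresh minimum
      have hanb : a ∉ b :: t := fun hm => absurd (hmin a hm) (not_le.mpr hlt)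
      have hpa : (a + 1 ∈ a :: b :: t) ↔ b = a + 1 := by
        constructor
        · intro hm
          rcases List.mem_cons.mp hm with he | hm
          · omega
          · have := hmin _ hm; omega
        · intro he; simp [he]
      have hpc : ∀ c ∈ b :: t, ((c + 1 ∈ a :: b :: t) ↔ c + 1 ∈ b :: t) := by
        intro c hc
        have hbc := hmin c hc
        constructor
        · intro hm
          rcases List.mem_cons.mp hm with he | hm
          · omega
          · exact hm
        · intro hm; exact List.mem_cons_of_mem _ hm
      have hcard : pvRowCard (a :: b :: t)
          = (if b = a + 1 then 1 else 0) + pvRowCard (b :: t) := by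
        unfold pvRowCard
        rw [List.toFinset_cons, Finset.filter_insert]
        have hfc : (b :: t).toFinset.filter (fun c => c + 1 ∈ a :: b :: t)
            = (b :: t).toFinset.filter (fun c => c + 1 ∈ b :: t) := by
          apply Finset.filter_congr
          intro c hc
          simpa using hpc c (List.mem_toFinset.mp hc)
        by_cases hb : b = a + 1
        · have hani : a ∉ (b :: t).toFinset.filter (fun c => c + 1 ∈ b :: t) := by
            intro hm
            exact hanb (List.mem_toFinset.mp (Finset.mem_of_mem_filter a hm))
          rw [if_pos (hpa.mpr hb), if_pos hb, hfc, Finset.card_insert_of_notMem hani]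
          try omega
        · rw [if_neg (fun hm => hb (hpa.mp hm)), if_neg hb, hfc]
          try omega
      rw [hcard, ← ih]
      by_cases hb : b = a + 1 <;> (simp [hb]; try omega)
    · -- b = a : duplicate head
      have hdup : ∀ x, x ∈ a :: a :: t ↔ x ∈ a :: t := by intro x; simp
      rw [pvRowCard_congr _ _ hdup]
      have hfa : (decide (a = a + 1)) = false := by simp
      rw [hfa]
      simpa using ih

theorem pv_A_eq (pawns : List (Int × Int)) :
    connected_crossed_py pawns =
      (((PySem.Set.ofList (pawns.map (·.1)) : List Int).map
        (fun r => (pvRowCard (pvColsOf pawns r) : Int))).sum) := by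
  simp only [connected_crossed_py]
  have hkeys : (pawns.foldl (fun d p => d.modify p.1 [] fun cs => cs ++ [p.2])
        (PySem.Dict.empty : PySem.Dict Int (List Int))).keys
      = PySem.Set.ofList (pawns.map (·.1)) := by
    rw [PySem.Dict.keys_foldl_modify_key pawns (fun p => p.1) []
        (fun _ p => fun cs => cs ++ [p.2]) PySem.Dict.empty]
    simp [PySem.Set.update_nil_left, PySem.Dict.keys_empty]
  have hnodup : (pawns.foldl (fun d p => d.modify p.1 [] fun cs => cs ++ [p.2])
        (PySem.Dict.empty : PySem.Dict Int (List Int))).keys.Nodup := by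
    rw [hkeys]; exact PySem.Set.nodup_ofList _
  rw [PySem.Dict.values_eq_map_keys _ hnodup [], hkeys]
  have hgetD : ∀ r : Int,
      (pawns.foldl (fun d p => d.modify p.1 [] fun cs => cs ++ [p.2])
        (PySem.Dict.empty : PySem.Dict Int (List Int))).getD r [] = pvColsOf pawns r := by
    intro r
    rw [PySem.Dict.getD_foldl_modify_append pawns PySem.Dict.empty r]
    simp [pvColsOf, PySem.Dict.getD_empty]
  simp only [hgetD, PySem.List.slice_from_one, PySem.List.foldl_ite_add_one, List.foldl_map]
  rw [PySem.List.foldl_add, zero_add]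
  refine congrArg List.sum (List.map_congr_left ?_)
  intro r _
  have hp := PySem.List.sorted_pairwise (pvColsOf pawns r) (fun x => x)
  rw [pv_adj_sorted _ hp]
  apply congrArg
  apply pvRowCard_congr
  intro x
  exact PySem.List.mem_sorted _ _ _ x

theorem pv_B_eq (pawns : List (Int × Int)) :
    connected_crossed_py_alt pawns =
      ((pawns.toFinset.filter (fun p => (p.1, p.2 + 1) ∈ pawns)).card : Int) := by
  unfold connected_crossed_py_alt
  rw [PySem.List.foldl_if_add_one, zero_add]
  have hnd : (PySem.Set.ofList pawns).Nodup := PySem.Set.nodup_ofList pawns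
  have hc : ∀ p : Int × Int,
      (PySem.Set.contains (PySem.Set.ofList pawns) (p.1, p.2 + 1))
        = decide ((p.1, p.2 + 1) ∈ pawns) := by
    intro p
    simp [PySem.Set.contains, PySem.Set.mem_ofList]
  rw [List.countP_congr (fun x _ => by rw [hc x])]
  rw [List.countP_eq_length_filter,
      ← List.toFinset_card_of_nodup (List.Nodup.filter _ hnd),
      List.toFinset_filter]
  have ht : (PySem.Set.ofList pawns).toFinset = pawns.toFinset := by
    ext x; simp [PySem.Set.mem_ofList]
  rw [ht]
  have hfe : {x ∈ pawns.toFinset | decide ((x.1, x.2 + 1) ∈ pawns) = true}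
      = {p ∈ pawns.toFinset | (p.1, p.2 + 1) ∈ pawns} := by
    apply Finset.filter_congr; intro x _; simp
  rw [hfe]

theorem pv_mem_colsOf (pawns : List (Int × Int)) (r c : Int) :
    c ∈ pvColsOf pawns r ↔ (r, c) ∈ pawns := by
  simp only [pvColsOf, List.mem_map, List.mem_filter, beq_iff_eq]
  constructor
  · rintro ⟨⟨x, y⟩, ⟨hm, h1⟩, h2⟩
    simp only at h1 h2
    subst h1; subst h2; exact hm
  · intro hm; exact ⟨(r, c), ⟨hm, rfl⟩, rfl⟩

theorem pv_fiber (pawns : List (Int × Int)) :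
    (pawns.toFinset.filter (fun p => (p.1, p.2 + 1) ∈ pawns)).card =
      ∑ r ∈ (pawns.map (·.1)).toFinset, pvRowCard (pvColsOf pawns r) := by
  rw [Finset.card_eq_sum_card_fiberwise
      (f := Prod.fst) (t := (pawns.map (·.1)).toFinset)
      (fun x hx => by
        simp only [Finset.coe_filter, Set.mem_setOf_eq] at hx
        simp only [List.coe_toFinset, Set.mem_setOf_eq, List.mem_map]
        exact ⟨x, List.mem_toFinset.mp hx.1, rfl⟩)]
  apply Finset.sum_congr rfl
  intro r _
  have himg : {p ∈ pawns.toFinset.filter (fun p => (p.1, p.2 + 1) ∈ pawns) | p.1 = r}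
      = ((pvColsOf pawns r).toFinset.filter
          (fun c => c + 1 ∈ pvColsOf pawns r)).image (fun c => (r, c)) := by
    ext ⟨x, y⟩
    simp only [Finset.mem_filter, Finset.mem_image, List.mem_toFinset, pv_mem_colsOf]
    constructor
    · rintro ⟨⟨hm, hn⟩, rfl⟩
      exact ⟨y, ⟨hm, hn⟩, rfl⟩
    · rintro ⟨c, ⟨hm, hn⟩, he⟩
      obtain ⟨rfl, rfl⟩ := Prod.mk.injEq .. ▸ he
      exact ⟨⟨hm, hn⟩, rfl⟩
  rw [himg, Finset.card_image_of_injective _ (fun c1 c2 hcc => by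
    simpa using congrArg Prod.snd hcc)]
  rfl

-- ===== VERDICT (by name: the statement is the Claim_ definition above) =====
theorem connected_crossed_py_spec : Claim_equal_connected_crossed_py := by
  intro pawns _
  unfold Spec_connected_crossed_py
  rw [pv_A_eq, pv_B_eq, pv_fiber]
  push_cast
  rw [← List.sum_toFinset _ (PySem.Set.nodup_ofList (pawns.map (·.1)))]
  apply Finset.sum_congr _ (fun _ _ => rfl)
  ext r
  simp [PySem.Set.mem_ofList]
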